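-- pv_equiv track=rewrite | github.com/RonaldMonteiro/ortographo-nltk | ortographo.py | invert_letters
-- ===== SOURCE A (Python) =====
-- def invert_letters(word):
--     def posting_letters(parts):
--         unknown_words = []
--         letters = 'abcedfghijklmnopqrstuvwxyzáâàãéêèíîìóôòõúûùç'
--         for _left, _right in parts:
--             for letra in letters:
--                 unknown_words.append(_left + letra + _right)
--         return unknown_words
--
--
--     def excluding_letters(parts):
--         unknown_words = []
--         for _left, _right in parts:
--             unknown_words.append(_left + _right[1:])
--         return unknown_words
--
--     def changing_letters(parts):
--         unknown_words = []
--         letters = 'abcedfghijklmnopqrstuvwxyzáâàãéêèíîìóôòõúûùç'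
--         for _left, _right in parts:
--             for letra in letters:
--                 unknown_words.append(_left + letra + _right[1:])
--         return unknown_words
--
--
--     def inverting_letters(parts):
--         unknown_words = []
--         for _left, _right in parts:
--             if len(_right) > 1:
--                 unknown_words.append(_left + _right[1] + _right[0] + _right[2:])
--         return unknown_words
--     parts = []
--     v = 0
--     for v in range(len(word) + 1):
--         parts.append((word[:v], word[v:]))
--     created_words = posting_letters(parts)
--     created_words += excluding_letters(parts)
--     created_words += changing_letters(parts)
--     created_words += inverting_letters(parts)
--     return created_words
-- ===== SOURCE B (Python) =====
-- def invert_letters(word):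
--     letters = 'abcedfghijklmnopqrstuvwxyzáâàãéêèíîìóôòõúûùç'
--
--     def go(left, right):
--         ins_here = [left + c + right for c in letters]
--         if right == '':
--             return ins_here, [left], [left + c for c in letters], []
--         head, rest = right[0], right[1:]
--         ins, dels, subs, trans = go(left + head, rest)
--         if rest != '':
--             trans = [left + rest[0] + head + rest[1:]] + trans
--         return (ins_here + ins,
--                 [left + rest] + dels,
--                 [left + c + rest for c in letters] + subs,
--                 trans)
--
--     i, d, s, t = go('', word)
--     return i + d + s + t
-- ===== Notes on version B (the rewrite author's own statement) =====
-- stated objective: alternative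
-- what changed: Replaces A's index loop that materialises a list of slice pairs and then runs four separate passes over it by a structural recursion on the word that carries (left, right) and peels one character per call, building the four edit groups back-to-front as the recursion returns; no index arithmetic or parts list.
import Mathlib
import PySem

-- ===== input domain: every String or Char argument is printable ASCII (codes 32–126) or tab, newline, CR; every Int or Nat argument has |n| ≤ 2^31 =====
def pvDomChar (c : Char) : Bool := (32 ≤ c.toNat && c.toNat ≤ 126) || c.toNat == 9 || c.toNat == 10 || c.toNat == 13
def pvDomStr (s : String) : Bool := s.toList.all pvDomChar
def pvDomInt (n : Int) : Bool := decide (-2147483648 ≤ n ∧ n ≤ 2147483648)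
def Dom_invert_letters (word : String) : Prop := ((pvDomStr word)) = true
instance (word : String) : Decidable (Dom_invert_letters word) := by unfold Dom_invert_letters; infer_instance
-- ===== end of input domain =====

-- B replaces A's index loop + materialised parts list + four separate passes by one
-- structural recursion on the word carrying (left, right), building the four edit
-- groups as the recursion returns (objective: alternative decomposition, same cost).

def pvLetters : List Char := "abcedfghijklmnopqrstuvwxyzáâàãéêèíîìóôòõúûùç".toList

-- ===== PORT A =====
-- indexing _right[1]/_right[0] happens under the guard len(_right) > 1, so the
-- `.getD ' '` totalisation is never reached on any input; otherwise literal.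
def invert_letters (word : String) : List String :=
  let w := word.toList
  let parts : List (List Char × List Char) :=
    (PySem.List.pyRange 0 (PySem.Str.len word + 1) 1).foldl
      (fun acc v => acc ++ [(PySem.List.slice w none (some v), PySem.List.slice w (some v) none)]) []
  let posting := parts.foldl
      (fun acc p => pvLetters.foldl (fun a letra => a ++ [String.ofList (p.1 ++ letra :: p.2)]) acc) []
  let excluding := parts.foldl
      (fun acc p => acc ++ [String.ofList (p.1 ++ PySem.List.slice p.2 (some 1) none)]) []
  let changing := parts.foldl
      (fun acc p => pvLetters.foldl (fun a letra => a ++ [String.ofList (p.1 ++ letra :: PySem.List.slice p.2 (some 1) none)]) acc) []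
  let inverting := parts.foldl
      (fun acc p => if 1 < p.2.length then
          acc ++ [String.ofList (p.1 ++ ((PySem.List.pyGet? p.2 1).getD ' ') :: ((PySem.List.pyGet? p.2 0).getD ' ') :: PySem.List.slice p.2 (some 2) none)]
        else acc) []
  posting ++ excluding ++ changing ++ inverting

-- ===== PORT B =====
-- recursive helper go(left, right) of Source B; right[0]/right[1:] become the cons pattern
def pvGo (left : List Char) (right : List Char) :
    List String × List String × List String × List String :=
  let ins_here := pvLetters.map (fun c => String.ofList (left ++ c :: right))
  match right with
  | [] => (ins_here, [String.ofList left], pvLetters.map (fun c => String.ofList (left ++ [c])), [])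
  | head :: rest =>
    let r := pvGo (left ++ [head]) rest
    let trans := match rest with
      | [] => r.2.2.2
      | r0 :: rr => String.ofList (left ++ r0 :: head :: rr) :: r.2.2.2
    (ins_here ++ r.1,
     String.ofList (left ++ rest) :: r.2.1,
     pvLetters.map (fun c => String.ofList (left ++ c :: rest)) ++ r.2.2.1,
     trans)

def invert_letters_alt (word : String) : List String :=
  let r := pvGo [] word.toList
  r.1 ++ r.2.1 ++ r.2.2.1 ++ r.2.2.2

-- ===== PRECONDITION & SPEC =====
def Spec_invert_letters (word : String) (out : List String) : Prop := out = invert_letters_alt word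
instance (word : String) (out : List String) : Decidable (Spec_invert_letters word out) := by unfold Spec_invert_letters; infer_instance

-- ===== CLAIM (what is proved, stated in full; the proofs are below) =====
def Claim_equal_invert_letters : Prop := ∀ (word : String), Dom_invert_letters word → Spec_invert_letters word (invert_letters word)

-- ===== LEMMAS AND PROOFS =====

-- the per-split contributions of each edit kind, (left, right)-indexed
def pvInsF (p : List Char × List Char) : List String :=
  pvLetters.map (fun c => String.ofList (p.1 ++ c :: p.2))
def pvDelF (p : List Char × List Char) : String :=
  String.ofList (p.1 ++ p.2.tail)
def pvSubF (p : List Char × List Char) : List String :=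
  pvLetters.map (fun c => String.ofList (p.1 ++ c :: p.2.tail))
def pvTransF (p : List Char × List Char) : List String :=
  match p.2 with
  | h :: r0 :: rr => [String.ofList (p.1 ++ r0 :: h :: rr)]
  | _ => []

-- the list of splits A materialises, described recursively
def pvSplits (left : List Char) : List Char → List (List Char × List Char)
  | [] => [(left, [])]
  | h :: t => (left, h :: t) :: pvSplits (left ++ [h]) t

-- the per-split contributions, Int-index form (A's view)
def pvIns (w : List Char) (i : Int) : List String :=
  pvLetters.map (fun c => String.ofList (PySem.List.slice w none (some i) ++ c :: PySem.List.slice w (some i) none))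
def pvDel (w : List Char) (i : Int) : String :=
  String.ofList (PySem.List.slice w none (some i) ++ PySem.List.slice (PySem.List.slice w (some i) none) (some 1) none)
def pvSub (w : List Char) (i : Int) : List String :=
  pvLetters.map (fun c => String.ofList (PySem.List.slice w none (some i) ++ c :: PySem.List.slice (PySem.List.slice w (some i) none) (some 1) none))
def pvTrans (w : List Char) (i : Int) : List String :=
  let r := PySem.List.slice w (some i) none
  if 1 < r.length then
    [String.ofList (PySem.List.slice w none (some i) ++ ((PySem.List.pyGet? r 1).getD ' ') :: ((PySem.List.pyGet? r 0).getD ' ') :: PySem.List.slice r (some 2) none)]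
  else []

theorem pv_foldl_if {α : Type} (pc : α → Prop) [DecidablePred pc] (f : α → String)
    (l : List α) (acc : List String) :
    l.foldl (fun acc p => if pc p then acc ++ [f p] else acc) acc
      = acc ++ l.flatMap (fun p => if pc p then [f p] else []) := by
  induction l generalizing acc with
  | nil => simp
  | cons p t ih =>
    by_cases h : pc p <;> simp [h, ih]

theorem pv_A_eq (word : String) :
    invert_letters word =
      (PySem.List.pyRange 0 (PySem.Str.len word + 1) 1).flatMap (pvIns word.toList) ++
      (PySem.List.pyRange 0 (PySem.Str.len word + 1) 1).map (pvDel word.toList) ++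
      (PySem.List.pyRange 0 (PySem.Str.len word + 1) 1).flatMap (pvSub word.toList) ++
      (PySem.List.pyRange 0 (PySem.Str.len word + 1) 1).flatMap (pvTrans word.toList) := by
  unfold invert_letters
  simp only [PySem.List.foldl_append_singleton_eq_map, List.nil_append]
  rw [PySem.List.foldl_append_eq_flatMap, PySem.List.foldl_append_eq_flatMap,
      pv_foldl_if (fun p : List Char × List Char => 1 < p.2.length)
        (fun p => String.ofList (p.1 ++ ((PySem.List.pyGet? p.2 1).getD ' ') :: ((PySem.List.pyGet? p.2 0).getD ' ') :: PySem.List.slice p.2 (some 2) none))]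
  simp only [List.flatMap_map, List.map_map]
  unfold pvIns pvDel pvSub pvTrans
  simp [Function.comp_def]

-- splits list in index form
theorem pv_splits_eq (right left : List Char) :
    pvSplits left right
      = (List.range (right.length + 1)).map (fun k => (left ++ right.take k, right.drop k)) := by
  induction right generalizing left with
  | nil => simp [pvSplits]
  | cons h t ih =>
    simp [pvSplits, ih, List.range_succ_eq_map, List.map_map, Function.comp_def]

-- Int-index and pair forms agree at natural indices
theorem pv_ins_eq (w : List Char) (k : Nat) :
    pvIns w (k : Int) = pvInsF (w.take k, w.drop k) := by
  simp [pvIns, pvInsF, PySem.List.slice_to_natCast, PySem.List.slice_from_natCast]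
theorem pv_del_eq (w : List Char) (k : Nat) :
    pvDel w (k : Int) = pvDelF (w.take k, w.drop k) := by
  simp [pvDel, pvDelF, PySem.List.slice_to_natCast, PySem.List.slice_from_natCast,
        PySem.List.slice_from_one]
theorem pv_sub_eq (w : List Char) (k : Nat) :
    pvSub w (k : Int) = pvSubF (w.take k, w.drop k) := by
  simp [pvSub, pvSubF, PySem.List.slice_to_natCast, PySem.List.slice_from_natCast,
        PySem.List.slice_from_one]
theorem pv_trans_eq (w : List Char) (k : Nat) :
    pvTrans w (k : Int) = pvTransF (w.take k, w.drop k) := by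
  simp only [pvTrans, pvTransF, PySem.List.slice_to_natCast, PySem.List.slice_from_natCast]
  rcases h : w.drop k with _ | ⟨a, _ | ⟨b, r⟩⟩ <;>
    simp [PySem.List.pyGet?, PySem.List.pyIdx?, PySem.List.slice]
  · rfl

-- one-step unfolding of pvGo at a cons
theorem pvGo_cons (left : List Char) (h : Char) (t : List Char) :
    pvGo left (h :: t) =
      (pvLetters.map (fun c => String.ofList (left ++ c :: h :: t)) ++ (pvGo (left ++ [h]) t).1,
       String.ofList (left ++ t) :: (pvGo (left ++ [h]) t).2.1,
       pvLetters.map (fun c => String.ofList (left ++ c :: t)) ++ (pvGo (left ++ [h]) t).2.2.1,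
       match t with
       | [] => (pvGo (left ++ [h]) t).2.2.2
       | r0 :: rr => String.ofList (left ++ r0 :: h :: rr) :: (pvGo (left ++ [h]) t).2.2.2) := rfl

-- B's recursion computes the four grouped flatMaps over the splits
theorem pv_go_eq (right left : List Char) :
    pvGo left right
      = ((pvSplits left right).flatMap pvInsF, (pvSplits left right).map pvDelF,
         (pvSplits left right).flatMap pvSubF, (pvSplits left right).flatMap pvTransF) := by
  induction right generalizing left with
  | nil => simp [pvGo, pvSplits, pvInsF, pvDelF, pvSubF, pvTransF]
  | cons h t ih =>
    rw [pvGo_cons, ih]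
    cases t <;> simp [pvSplits, pvInsF, pvDelF, pvSubF, pvTransF]

-- ===== VERDICT (by name: the statement is the Claim_ definition above) =====
theorem invert_letters_spec : Claim_equal_invert_letters := by
  intro word _
  unfold Spec_invert_letters invert_letters_alt
  rw [pv_A_eq, pv_go_eq, pv_splits_eq]
  simp only [List.nil_append]
  have hr : PySem.List.pyRange 0 (PySem.Str.len word + 1) 1
      = (List.range (word.toList.length + 1)).map (fun k : Nat => (k : Int)) := by
    rw [PySem.List.pyRange_one]
    simp [PySem.Str.len]
  simp only [hr, List.flatMap_map, List.map_map, Function.comp_def,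
    pv_ins_eq, pv_del_eq, pv_sub_eq, pv_trans_eq]
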